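-- pv_equiv track=rewrite | github.com/kemalbatut/olympic-data-pipeline | utils.py | permutations_all_lengths
-- ===== SOURCE A (Python) =====
-- def permutations_all_lengths(lst):
--     def permute(cur, remaining, result):
--         if cur:
--             result.append(cur[:])
--
--         for i in range(len(remaining)):
--             permute(cur + [remaining[i]], remaining[:i] + remaining[i + 1 :], result)
--
--     result = []
--     permute([], lst, result)
--     return result
-- ===== SOURCE B (Python) =====
-- def permutations_all_lengths(lst):
--     result = []
--     stack = [([], lst)]
--     while stack:
--         cur, remaining = stack.pop()
--         if cur:
--             result.append(cur)
--         children = [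
--             (cur + [remaining[i]], remaining[:i] + remaining[i + 1:])
--             for i in range(len(remaining))
--         ]
--         stack.extend(reversed(children))
--     return result
-- ===== Notes on version B (the rewrite author's own statement) =====
-- stated objective: alternative
-- what changed: Replaced the recursive helper with an accumulator list by an iterative depth-first traversal over an explicit stack of (cur, remaining) frames, pushing children in reverse so the pre-order output is identical.
import Mathlib
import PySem

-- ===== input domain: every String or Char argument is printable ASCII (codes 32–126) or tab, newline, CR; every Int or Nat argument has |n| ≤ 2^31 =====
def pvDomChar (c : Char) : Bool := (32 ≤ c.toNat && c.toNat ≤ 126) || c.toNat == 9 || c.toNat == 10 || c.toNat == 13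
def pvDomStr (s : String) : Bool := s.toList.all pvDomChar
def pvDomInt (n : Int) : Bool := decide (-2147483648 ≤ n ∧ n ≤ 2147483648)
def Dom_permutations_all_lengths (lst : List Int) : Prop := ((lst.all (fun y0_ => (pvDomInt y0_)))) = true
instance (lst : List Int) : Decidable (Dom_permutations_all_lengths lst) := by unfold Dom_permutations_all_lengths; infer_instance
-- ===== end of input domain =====

-- B replaces A's recursive helper by an iterative DFS over an explicit stack (same pre-order output, same cost).

-- ===== PORT A =====
-- A's inner 'permute' (recursion) and its 'for i in range(len(remaining))' loop (loopA, index i).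
mutual
def permuteA (cur remaining : List Int) (result : List (List Int)) : List (List Int) :=
  loopA cur remaining (if cur.isEmpty then result else result ++ [cur]) 0
termination_by (remaining.length, 1, 0)
decreasing_by
  apply Prod.Lex.right; exact Prod.Lex.left _ _ (by omega)
def loopA (cur remaining : List Int) (result : List (List Int)) (i : Nat) : List (List Int) :=
  if h : i < remaining.length then
    loopA cur remaining
      (permuteA (cur ++ [remaining[i]]) (remaining.take i ++ remaining.drop (i + 1)) result)
      (i + 1)
  else result
termination_by (remaining.length, 0, remaining.length - i)
decreasing_by
  · apply Prod.Lex.left; simp [List.length_take, List.length_drop]; omega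
  · apply Prod.Lex.right; apply Prod.Lex.right; omega
end

def permutations_all_lengths (lst : List Int) : List (List Int) := permuteA [] lst []

-- ===== PORT B =====
-- tree-size weight used only as runB's termination measure
def tw : Nat → Nat
  | 0 => 1
  | n + 1 => 1 + (n + 1) * tw n

def stackMeasure (stack : List (List Int × List Int)) : Nat :=
  (stack.map fun p => tw p.2.length).sum

-- cited by runB's decreasing_by: popping a frame and pushing its children shrinks the measure
lemma runB_dec (cur r : List Int) (rest : List (List Int × List Int)) :
    stackMeasure (((List.range r.length).map fun i =>
        (cur ++ [r[i]!], r.take i ++ r.drop (i + 1))) ++ rest) <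
      stackMeasure ((cur, r) :: rest) := by
  unfold stackMeasure
  simp only [List.map_append, List.sum_append, List.map_cons, List.sum_cons]
  have key : ((((List.range r.length).map fun i =>
      (cur ++ [r[i]!], r.take i ++ r.drop (i + 1))).map
        fun p : List Int × List Int => tw p.2.length).sum) < tw r.length := by
    rw [List.map_map]
    cases hr : r.length with
    | zero => simp [tw]
    | succ m =>
      have hmap : ((List.range (m + 1)).map
          ((fun p : List Int × List Int => tw p.2.length) ∘
            fun i => (cur ++ [r[i]!], r.take i ++ r.drop (i + 1)))) =
          (List.range (m + 1)).map fun _ => tw m := by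
        apply List.map_congr_left
        intro i hi
        have hi' : i < m + 1 := List.mem_range.mp hi
        have hlen : (List.take i r ++ List.drop (i + 1) r).length = m := by
          simp [List.length_take, List.length_drop, hr]; omega
        simp [Function.comp, hlen]
      rw [hmap]
      simp only [List.map_const', List.sum_replicate, tw, smul_eq_mul, List.length_range]
      omega
  omega

-- B's while loop: Lean list head = top of B's Python stack; B pushes the reversed children
-- onto the end of its Python list, i.e. the children in order at the top — 'children ++ rest' here.
def runB (result : List (List Int)) (stack : List (List Int × List Int)) : List (List Int) :=
  match stack with
  | [] => result
  | (cur, remaining) :: rest =>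
    runB (if cur.isEmpty then result else result ++ [cur])
      (((List.range remaining.length).map fun i =>
          (cur ++ [remaining[i]!], remaining.take i ++ remaining.drop (i + 1))) ++ rest)
termination_by stackMeasure stack
decreasing_by exact runB_dec cur remaining rest

def permutations_all_lengths_alt (lst : List Int) : List (List Int) := runB [] [([], lst)]

-- ===== PRECONDITION & SPEC =====
def Spec_permutations_all_lengths (lst : List Int) (out : List (List Int)) : Prop := out = permutations_all_lengths_alt lst
instance (lst : List Int) (out : List (List Int)) : Decidable (Spec_permutations_all_lengths lst out) := by unfold Spec_permutations_all_lengths; infer_instance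

-- ===== CLAIM (what is proved, stated in full; the proofs are below) =====
def Claim_equal_permutations_all_lengths : Prop := ∀ (lst : List Int), Dom_permutations_all_lengths lst → Spec_permutations_all_lengths lst (permutations_all_lengths lst)

-- ===== LEMMAS AND PROOFS =====

-- pure description of the subtree output of a frame, fuelled by the length of 'remaining'
def subF : Nat → List Int → List Int → List (List Int)
  | 0, cur, _ => if cur.isEmpty then [] else [cur]
  | n + 1, cur, rem =>
    (if cur.isEmpty then [] else [cur]) ++
      (List.range rem.length).flatMap fun i =>
        subF n (cur ++ [rem[i]!]) (rem.take i ++ rem.drop (i + 1))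

def S (cur rem : List Int) : List (List Int) := subF rem.length cur rem

lemma flatMap_congr_mem {α β : Type} {l : List α} {f g : α → List β}
    (h : ∀ a ∈ l, f a = g a) : l.flatMap f = l.flatMap g := by
  induction l with
  | nil => rfl
  | cons a t ih =>
    simp only [List.flatMap_cons]
    rw [h a (by simp), ih fun b hb => h b (by simp [hb])]

lemma S_unfold (cur rem : List Int) :
    S cur rem = (if cur.isEmpty then [] else [cur]) ++
      (List.range rem.length).flatMap fun i =>
        S (cur ++ [rem[i]!]) (rem.take i ++ rem.drop (i + 1)) := by
  cases hr : rem.length with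
  | zero =>
    have : rem = [] := List.eq_nil_of_length_eq_zero hr
    subst this
    simp [S, subF]
  | succ m =>
    unfold S
    rw [hr]
    simp only [subF]
    rw [hr]
    congr 1
    apply flatMap_congr_mem
    intro i hi
    have hi' : i < m + 1 := List.mem_range.mp hi
    have hlen : (rem.take i ++ rem.drop (i + 1)).length = m := by
      simp [List.length_take, List.length_drop, hr]; omega
    rw [hlen]

lemma permA_eq : ∀ (n : Nat) (cur rem : List Int) (res : List (List Int)),
    rem.length ≤ n → permuteA cur rem res = res ++ S cur rem := by
  intro n
  induction n with
  | zero =>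
    intro cur rem res h
    have : rem = [] := List.eq_nil_of_length_eq_zero (by omega)
    subst this
    rw [permuteA, loopA]
    simp only [List.length_nil, Nat.lt_irrefl, dif_neg, not_false_iff]
    cases hc : cur.isEmpty <;> simp [S, subF, hc]
  | succ n ih =>
    intro cur rem res h
    have hloop : ∀ (k i : Nat) (res' : List (List Int)), rem.length - i = k →
        loopA cur rem res' i = res' ++ (List.range' i (rem.length - i)).flatMap
          (fun j => S (cur ++ [rem[j]!]) (rem.take j ++ rem.drop (j + 1))) := by
      intro k
      induction k with
      | zero =>
        intro i res' hk
        rw [loopA, dif_neg (by omega), hk]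
        simp [List.range']
      | succ k ihk =>
        intro i res' hk
        have hi : i < rem.length := by omega
        rw [loopA, dif_pos hi]
        have hchild : (rem.take i ++ rem.drop (i + 1)).length ≤ n := by
          simp only [List.length_append, List.length_take, List.length_drop]; omega
        rw [ih _ _ _ hchild, ihk (i + 1) _ (by omega)]
        have hrange : List.range' i (rem.length - i) =
            i :: List.range' (i + 1) (rem.length - (i + 1)) := by
          have he : rem.length - i = (rem.length - (i + 1)) + 1 := by omega
          rw [he, List.range'_succ]
        rw [hrange, List.flatMap_cons, getElem!_pos rem i hi]
        simp [List.append_assoc]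
    rw [permuteA, hloop rem.length 0 _ (by omega), S_unfold]
    simp only [Nat.sub_zero, ← List.range_eq_range']
    split <;> simp

lemma runB_eq : ∀ (res : List (List Int)) (stack : List (List Int × List Int)),
    runB res stack = res ++ stack.flatMap (fun p => S p.1 p.2) := by
  intro res stack
  induction res, stack using runB.induct with
  | case1 res => simp [runB]
  | case2 res cur remaining rest ih =>
    simp only [dite_eq_ite] at ih
    rw [runB, ih, List.flatMap_cons, List.flatMap_append, S_unfold cur remaining]
    rw [List.flatMap_map]
    split <;> simp [List.append_assoc]

-- ===== VERDICT (by name: the statement is the Claim_ definition above) =====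
theorem permutations_all_lengths_spec : Claim_equal_permutations_all_lengths := by
  intro lst _
  unfold Spec_permutations_all_lengths permutations_all_lengths permutations_all_lengths_alt
  rw [permA_eq lst.length [] lst [] le_rfl, runB_eq]
  simp [S]
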